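-- pv_equiv track=rewrite | github.com/loborobotos/letta | letta/adapters/sglang_native_adapter.py | _resolve_tokenizer_path
-- ===== SOURCE A (Python) =====
-- def _resolve_tokenizer_path(model_name: str) -> str:
--     """Resolve model name to a tokenizer-loadable path.
--
--     Handles handles like 'sglang/slime-sglang//local/path' or
--     'slime-sglang//local/path' by extracting the local filesystem path.
--     """
--     # Strip leading provider prefixes (e.g. 'sglang/', 'openai-proxy/')
--     # until we find either a HF repo id or a local path
--     parts = model_name.split("/")
--     # Reconstruct: find where the absolute path starts (leading '/')
--     # e.g. "slime-sglang//opt/..." -> after splitting on '/' gives ['slime-sglang', '', 'opt', ...]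
--     # join from first empty string onward to recover '/opt/...'
--     for i, part in enumerate(parts):
--         if part == "" and i > 0:
--             local_path = "/" + "/".join(parts[i + 1 :])
--             if local_path != "/":
--                 return local_path
--     return model_name
-- ===== SOURCE B (Python) =====
-- def _resolve_tokenizer_path(model_name: str) -> str:
--     """Single left-to-right character scan for the first '//' (no split/join)."""
--     for i in range(len(model_name) - 1):
--         if model_name[i] == "/" and model_name[i + 1] == "/":
--             rest = model_name[i + 2:]
--             if rest:
--                 return "/" + rest
--             return model_name
--     return model_name
-- ===== Notes on version B (the rewrite author's own statement) =====
-- stated objective: alternative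
-- what changed: Replaces A's split-into-segments, enumerate loop and join reconstruction by a single left-to-right character scan that finds the first double-slash boundary and slices the suffix off directly, with no intermediate segment list.
import Mathlib
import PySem

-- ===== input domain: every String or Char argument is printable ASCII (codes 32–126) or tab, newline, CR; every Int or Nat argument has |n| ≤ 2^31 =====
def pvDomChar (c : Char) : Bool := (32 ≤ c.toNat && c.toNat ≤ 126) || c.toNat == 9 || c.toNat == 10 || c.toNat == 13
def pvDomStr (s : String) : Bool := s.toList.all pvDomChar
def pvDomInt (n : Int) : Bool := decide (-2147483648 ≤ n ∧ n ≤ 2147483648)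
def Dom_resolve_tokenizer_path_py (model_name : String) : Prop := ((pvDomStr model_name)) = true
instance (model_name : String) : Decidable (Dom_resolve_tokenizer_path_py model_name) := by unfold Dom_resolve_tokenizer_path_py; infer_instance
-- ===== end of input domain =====

-- B replaces A's split('/')-then-enumerate-then-join reconstruction by a single character
-- scan for the first '//' (idiomatic, one pass, no intermediate list of segments).

-- ===== PORT A =====
-- the 'for i, part in enumerate(parts)' loop with early return; 'rest' is parts[i+1:]
def resolveALoop : List (List Char) → Nat → Option (List Char)
  | [], _ => none
  | p :: rest, i =>
    if p = [] ∧ i > 0 then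
      -- local_path = "/" + "/".join(parts[i+1:])
      let lp := '/' :: PySem.Chars.join ['/'] rest
      if lp ≠ ['/'] then some lp else resolveALoop rest (i + 1)
    else resolveALoop rest (i + 1)

def resolve_tokenizer_path_py (model_name : String) : String :=
  let parts := PySem.Chars.splitOn model_name.toList ['/']   -- model_name.split("/")
  match resolveALoop parts 0 with
  | some lp => String.ofList lp
  | none => model_name

-- ===== PORT B =====
-- the scan 'for i in range(len(s)-1): if s[i]=="/" and s[i+1]=="/": …' as structural recursion
def resolveBGo : List Char → Option (List Char)
  | a :: b :: rest =>
    if a = '/' ∧ b = '/' then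
      -- rest = s[i+2:]; if rest: return "/" + rest; return model_name (none)
      if rest = [] then none else some ('/' :: rest)
    else resolveBGo (b :: rest)
  | _ => none

def resolve_tokenizer_path_py_alt (model_name : String) : String :=
  match resolveBGo model_name.toList with
  | some lp => String.ofList lp
  | none => model_name

-- ===== PRECONDITION & SPEC =====
def Spec_resolve_tokenizer_path_py (model_name : String) (out : String) : Prop := out = resolve_tokenizer_path_py_alt model_name
instance (model_name : String) (out : String) : Decidable (Spec_resolve_tokenizer_path_py model_name out) := by unfold Spec_resolve_tokenizer_path_py; infer_instance

-- ===== CLAIM (what is proved, stated in full; the proofs are below) =====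
def Claim_equal_resolve_tokenizer_path_py : Prop := ∀ (model_name : String), Dom_resolve_tokenizer_path_py model_name → Spec_resolve_tokenizer_path_py model_name (resolve_tokenizer_path_py model_name)

-- ===== LEMMAS AND PROOFS =====

-- clean recursive form of split('/') (proof-side only)
def mySplit : List Char → List (List Char)
  | [] => [[]]
  | c :: rest =>
    if c = '/' then [] :: mySplit rest
    else
      match mySplit rest with
      | [] => [[c]]
      | q :: qs => (c :: q) :: qs

theorem mySplit_slash (rest : List Char) : mySplit ('/' :: rest) = [] :: mySplit rest := by
  simp [mySplit]

theorem mySplit_cons_ne (c : Char) (rest q : List Char) (qs : List (List Char))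
    (hc : c ≠ '/') (h : mySplit rest = q :: qs) : mySplit (c :: rest) = (c :: q) :: qs := by
  simp [mySplit, hc, h]

theorem mySplit_ne_nil (cs : List Char) : mySplit cs ≠ [] := by
  cases cs with
  | nil => simp [mySplit]
  | cons c rest =>
    simp only [mySplit]
    split <;> [simp; split <;> simp]

theorem aloop_cons (p : List Char) (rest : List (List Char)) (i : Nat) :
    resolveALoop (p :: rest) i
      = if p = [] ∧ i > 0 then
          (if ('/' :: PySem.Chars.join ['/'] rest) ≠ ['/']
            then some ('/' :: PySem.Chars.join ['/'] rest)
            else resolveALoop rest (i + 1))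
        else resolveALoop rest (i + 1) := rfl

theorem bgo_cons_cons (a b : Char) (rest : List Char) :
    resolveBGo (a :: b :: rest)
      = if a = '/' ∧ b = '/' then (if rest = [] then none else some ('/' :: rest))
        else resolveBGo (b :: rest) := rfl

theorem splitOn_go_eq (l : List Char) : ∀ (fuel : Nat) (cur : List Char) (acc : List (List Char)),
    l.length < fuel →
    PySem.Chars.splitOn.go ['/'] fuel l cur acc
      = acc.reverse ++ (match mySplit l with
          | [] => [cur.reverse]
          | q :: qs => (cur.reverse ++ q) :: qs) := by
  induction l with
  | nil =>
    intro fuel cur acc hf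
    obtain ⟨f, rfl⟩ : ∃ f, fuel = f + 1 := ⟨fuel - 1, by omega⟩
    simp [PySem.Chars.splitOn.go, mySplit]
  | cons c rest ih =>
    intro fuel cur acc hf
    obtain ⟨f, rfl⟩ : ∃ f, fuel = f + 1 := ⟨fuel - 1, by omega⟩
    by_cases hc : c = '/'
    · subst hc
      have hstep : PySem.Chars.splitOn.go ['/'] (f+1) ('/' :: rest) cur acc
          = PySem.Chars.splitOn.go ['/'] f rest [] (cur.reverse :: acc) := by
        simp [PySem.Chars.splitOn.go, List.isPrefixOf]
      rw [hstep, ih f [] (cur.reverse :: acc) (by simpa using Nat.lt_of_succ_lt_succ hf),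
        mySplit_slash]
      cases h : mySplit rest with
      | nil => exact absurd h (mySplit_ne_nil rest)
      | cons q qs => simp
    · have hstep : PySem.Chars.splitOn.go ['/'] (f+1) (c :: rest) cur acc
          = PySem.Chars.splitOn.go ['/'] f rest (c :: cur) acc := by
        simp only [PySem.Chars.splitOn.go]
        simp [List.isPrefixOf]
        intro h'; exact absurd h'.symm hc
      rw [hstep, ih f (c :: cur) acc (by simpa using Nat.lt_of_succ_lt_succ hf)]
      cases h : mySplit rest with
      | nil => exact absurd h (mySplit_ne_nil rest)
      | cons q qs => rw [mySplit_cons_ne c rest q qs hc h]; simp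

theorem splitOn_eq_mySplit (cs : List Char) :
    PySem.Chars.splitOn cs ['/'] = mySplit cs := by
  have h := splitOn_go_eq cs (cs.length + 1) [] [] (by omega)
  simp only [PySem.Chars.splitOn]
  rw [h]
  cases h' : mySplit cs with
  | nil => exact absurd h' (mySplit_ne_nil cs)
  | cons q qs => simp

theorem join_mySplit (cs : List Char) : PySem.Chars.join ['/'] (mySplit cs) = cs := by
  induction cs with
  | nil => simp [mySplit, PySem.Chars.join_singleton]
  | cons c rest ih =>
    by_cases hc : c = '/'
    · subst hc
      rw [mySplit_slash]
      cases h : mySplit rest with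
      | nil => exact absurd h (mySplit_ne_nil rest)
      | cons q qs =>
        rw [PySem.Chars.join_cons_cons]
        rw [h] at ih
        simp [ih]
    · cases h : mySplit rest with
      | nil => exact absurd h (mySplit_ne_nil rest)
      | cons q qs =>
        rw [mySplit_cons_ne c rest q qs hc h]
        rw [h] at ih
        cases qs with
        | nil =>
          rw [PySem.Chars.join_singleton] at ih ⊢
          simp [ih]
        | cons w ws =>
          rw [PySem.Chars.join_cons_cons] at ih ⊢
          simp [ih]

-- the loop index only matters through its positivity
theorem resolveALoop_pos (ps : List (List Char)) : ∀ (i j : Nat), 0 < i → 0 < j →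
    resolveALoop ps i = resolveALoop ps j := by
  induction ps with
  | nil => intro i j _ _; rfl
  | cons p rest ih =>
    intro i j hi hj
    rw [aloop_cons, aloop_cons]
    by_cases hp : p = []
    · rw [if_pos (show p = [] ∧ i > 0 from ⟨hp, hi⟩),
        if_pos (show p = [] ∧ j > 0 from ⟨hp, hj⟩)]
      by_cases hlp : ('/' :: PySem.Chars.join ['/'] rest) ≠ ['/']
      · rw [if_pos hlp, if_pos hlp]
      · rw [if_neg hlp, if_neg hlp]
        exact ih _ _ (by omega) (by omega)
    · rw [if_neg (by simp [hp]), if_neg (by simp [hp])]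
      exact ih _ _ (by omega) (by omega)

-- A's loop over the tail of split('/') is B's scan
theorem key_lemma (cs : List Char) :
    resolveALoop ((mySplit cs).tail) 1 = resolveBGo cs := by
  induction cs with
  | nil => rfl
  | cons c t ih =>
    by_cases hc : c = '/'
    · subst hc
      rw [mySplit_slash, List.tail_cons]
      cases t with
      | nil => decide
      | cons d u =>
        by_cases hd : d = '/'
        · subst hd
          rw [mySplit_slash, aloop_cons,
            if_pos (show ([] : List Char) = [] ∧ 1 > 0 from ⟨rfl, one_pos⟩), join_mySplit,
            bgo_cons_cons, if_pos (show '/' = '/' ∧ '/' = '/' from ⟨rfl, rfl⟩)]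
          by_cases hu : u = []
          · subst hu
            rw [if_neg (by simp), if_pos rfl]
            decide
          · rw [if_pos (by simp [hu]), if_neg hu]
        · cases h : mySplit u with
          | nil => exact absurd h (mySplit_ne_nil u)
          | cons q qs =>
            rw [mySplit_cons_ne d u q qs hd h, aloop_cons, if_neg (by simp)]
            rw [mySplit_cons_ne d u q qs hd h, List.tail_cons] at ih
            rw [resolveALoop_pos qs 2 1 (by omega) (by omega), ih,
              bgo_cons_cons, if_neg (by simp [hd])]
    · cases h : mySplit t with
      | nil => exact absurd h (mySplit_ne_nil t)
      | cons q qs =>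
        rw [mySplit_cons_ne c t q qs hc h, List.tail_cons]
        rw [h, List.tail_cons] at ih
        rw [ih]
        cases t with
        | nil => rfl
        | cons d u => rw [bgo_cons_cons, if_neg (by simp [hc])]

theorem resolveALoop_mySplit (cs : List Char) :
    resolveALoop (mySplit cs) 0 = resolveBGo cs := by
  cases h : mySplit cs with
  | nil => exact absurd h (mySplit_ne_nil cs)
  | cons p rest =>
    rw [aloop_cons, if_neg (by simp)]
    have hk := key_lemma cs
    rw [h, List.tail_cons] at hk
    simpa using hk

-- ===== VERDICT (by name: the statement is the Claim_ definition above) =====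
theorem resolve_tokenizer_path_py_spec : Claim_equal_resolve_tokenizer_path_py := by
  intro model_name _
  unfold Spec_resolve_tokenizer_path_py resolve_tokenizer_path_py resolve_tokenizer_path_py_alt
  simp only [splitOn_eq_mySplit, resolveALoop_mySplit]
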